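-- pv_equiv track=rewrite | github.com/DailySoccer/EpicEleven | inc_version.py | general
-- ===== SOURCE A (Python) =====
-- def general(text, params):
--     if not params:
--         try:
--             return str(int(text)+1)
--         except ValueError:
--             return '0'
--     else:
--         our_params = params.pop()
--         partitioned = list(text.partition(our_params[0]))
--         partitioned[our_params[1]] = general(partitioned[our_params[1]], params)
--         return ''.join(partitioned)
-- ===== SOURCE B (Python) =====
-- def general(text, params):
--     # Iterative re-implementation: descend with an explicit stack, then unwind.
--     # Same side effect as the recursive version: params is emptied back-to-front.
--     stack = []
--     while params:
--         sep, idx = params.pop()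
--         parts = list(text.partition(sep))
--         stack.append((parts, idx))
--         text = parts[idx]
--     try:
--         text = str(int(text) + 1)
--     except ValueError:
--         text = '0'
--     while stack:
--         parts, idx = stack.pop()
--         parts[idx] = text
--         text = ''.join(parts)
--     return text
-- ===== Notes on version B (the rewrite author's own statement) =====
-- stated objective: alternative
-- what changed: The recursion is replaced by an explicit two-phase loop: a descent that pops params and pushes each partitioned triple with its index on a stack, then an unwind that writes the incremented core back through the saved triples; no call stack is used.
import Mathlib
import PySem

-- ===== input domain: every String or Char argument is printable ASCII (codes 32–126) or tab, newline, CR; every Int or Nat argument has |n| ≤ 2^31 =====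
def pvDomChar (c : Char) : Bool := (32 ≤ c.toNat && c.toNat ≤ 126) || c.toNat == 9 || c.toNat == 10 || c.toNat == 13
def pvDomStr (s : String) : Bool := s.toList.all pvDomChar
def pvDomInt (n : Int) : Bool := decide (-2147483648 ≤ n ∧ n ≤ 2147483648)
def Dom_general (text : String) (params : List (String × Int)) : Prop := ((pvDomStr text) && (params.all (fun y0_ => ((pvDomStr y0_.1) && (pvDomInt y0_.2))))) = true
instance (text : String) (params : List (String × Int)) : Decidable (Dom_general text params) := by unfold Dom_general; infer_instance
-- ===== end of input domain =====

-- B replaces the recursion by an explicit descent/unwind loop with a stack of partitioned triples;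
-- same return value. (Both Pythons empty `params` in place in the same order; only the return value is proved here.)

-- Hand port of Python's str.partition(sep): (before, sep, after) at the FIRST occurrence of sep,
-- (s, '', '') when absent. Exact for sep ≠ "" (Python raises ValueError on sep = ""; excluded by Pre_).
-- Used by both ports (both Pythons call text.partition identically).
def partitionPy (s sep : String) : List String :=
  let i := PySem.Str.find s sep
  if i = -1 then [s, "", ""]
  else [String.ofList (s.toList.take i.toNat), sep,
        String.ofList (s.toList.drop (i.toNat + sep.toList.length))]

-- ===== PORT A =====
def general (text : String) (params : List (String × Int)) : String :=
  match h : params.getLast? with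
  | none =>
      -- try: return str(int(text)+1) except ValueError: return '0'
      match PySem.Int.ofStr? text with
      | some n => PySem.Int.toStr (n + 1)
      | none => "0"
  | some op =>
      -- our_params = params.pop(); partitioned = list(text.partition(our_params[0]))
      let partitioned := partitionPy text op.1
      -- partitioned[our_params[1]] = general(partitioned[our_params[1]], params); return ''.join(partitioned)
      PySem.Str.join "" (PySem.List.pySetD partitioned op.2
        (general (PySem.List.pyGetD partitioned op.2 "") params.dropLast))
termination_by params.length
decreasing_by
  cases params with
  | nil => simp at h
  | cons a l => simp

-- ===== PORT B =====
-- second loop: while stack: parts, idx = stack.pop(); parts[idx] = text; text = ''.join(parts)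
def generalAltUnwind (text : String) (stack : List (List String × Int)) : String :=
  match stack with
  | [] => text
  | (parts, idx) :: rest =>
      generalAltUnwind (PySem.Str.join "" (PySem.List.pySetD parts idx text)) rest

-- first loop (params popped back-to-front = head-first over params.reverse) + the try/int core
def generalAltGo (text : String) (rps : List (String × Int)) (stack : List (List String × Int)) : String :=
  match rps with
  | [] =>
      let core := match PySem.Int.ofStr? text with
        | some n => PySem.Int.toStr (n + 1)
        | none => "0"
      generalAltUnwind core stack
  | (sep, idx) :: rest =>
      let parts := partitionPy text sep
      generalAltGo (PySem.List.pyGetD parts idx "") rest ((parts, idx) :: stack)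

def general_alt (text : String) (params : List (String × Int)) : String :=
  generalAltGo text params.reverse []

-- ===== PRECONDITION & SPEC =====
-- Pre_ excludes exactly the inputs where the Python A raises: an empty separator
-- (ValueError from str.partition) or an index outside the length-3 partition triple (IndexError).
def Pre_general (text : String) (params : List (String × Int)) : Prop :=
  ∀ p ∈ params, p.1 ≠ "" ∧ -3 ≤ p.2 ∧ p.2 < 3
instance (text : String) (params : List (String × Int)) : Decidable (Pre_general text params) := by
  unfold Pre_general; infer_instance
def pvWitness_general : String × (List (String × Int)) := ("41", [("x", 0)])

def Spec_general (text : String) (params : List (String × Int)) (out : String) : Prop := out = general_alt text params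
instance (text : String) (params : List (String × Int)) (out : String) : Decidable (Spec_general text params out) := by unfold Spec_general; infer_instance

-- ===== CLAIM (what is proved, stated in full; the proofs are below) =====
def Claim_equal_general : Prop := ∀ (text : String) (params : List (String × Int)), Dom_general text params → Pre_general text params → Spec_general text params (general text params)

-- ===== LEMMAS AND PROOFS =====

lemma general_nil (text : String) :
    general text [] =
      (match PySem.Int.ofStr? text with
       | some n => PySem.Int.toStr (n + 1)
       | none => "0") := by
  rw [general]
  simp

lemma general_concat (text : String) (ps : List (String × Int)) (op : String × Int) :
    general text (ps ++ [op]) =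
      PySem.Str.join "" (PySem.List.pySetD (partitionPy text op.1) op.2
        (general (PySem.List.pyGetD (partitionPy text op.1) op.2 "") ps)) := by
  rw [general]
  split
  · next h => simp at h
  · next op' h =>
      rw [List.getLast?_concat, Option.some_inj] at h
      subst h
      simp

lemma generalAltGo_eq (rps : List (String × Int)) :
    ∀ (text : String) (stack : List (List String × Int)),
      generalAltGo text rps stack = generalAltUnwind (general text rps.reverse) stack := by
  induction rps with
  | nil =>
      intro text stack
      rw [generalAltGo, List.reverse_nil, general_nil]
  | cons p rest ih =>
      obtain ⟨sep, idx⟩ := p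
      intro text stack
      rw [generalAltGo, ih, List.reverse_cons, general_concat, generalAltUnwind]

-- ===== VERDICT (by name: the statement is the Claim_ definition above) =====
theorem general_spec : Claim_equal_general := by
  intro text params _ _
  show general text params = general_alt text params
  rw [general_alt, generalAltGo_eq, List.reverse_reverse, generalAltUnwind]
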